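-- pv_equiv track=rewrite | github.com/lang-m/2022-paper-multiple-bloch-points | simtools/short_init.py | pattern_ascii
-- ===== SOURCE A (Python) =====
-- def pattern_ascii(characters):
--     """Pattern representing the binary representation of the given characters.
--
--     Head-to-head represents a 1 ('i'), tail-to-tail a 0 ('o').
--
--     Parameters
--     ----------
--     characters : str
--         String  to represent with Bloch points.
--
--     Returns
--     -------
--     str
--         Bloch point pattern encoded with `i` and `o`.
--     """
--     res = []
--     for c in characters:
--         binary = bin(ord(c))
--         binary = binary[2:].zfill(8)  # string starts with '0b'
--         for b in binary:
--             if b == "1":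
--                 res.append("i")
--             else:
--                 res.append("o")
--     return "".join(res)
-- ===== SOURCE B (Python) =====
-- def pattern_ascii(characters):
--     """Arithmetic bit extraction, no string formatting: walk the string backwards,
--     emit each character's 8 bits least-significant-first via divmod, reverse once."""
--     bits = []
--     for c in reversed(characters):
--         n = ord(c)
--         for _ in range(8):
--             n, r = divmod(n, 2)
--             bits.append('i' if r else 'o')
--     return ''.join(reversed(bits))
-- ===== Notes on version B (the rewrite author's own statement) =====
-- stated objective: alternative
-- what changed: Replaces A's bin()/zfill string-formatting with pure arithmetic bit extraction: B walks the string backwards, peels each character's 8 bits least-significant-first with divmod, and reverses the accumulated list once at the end; no binary-string intermediate exists.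
import Mathlib
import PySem

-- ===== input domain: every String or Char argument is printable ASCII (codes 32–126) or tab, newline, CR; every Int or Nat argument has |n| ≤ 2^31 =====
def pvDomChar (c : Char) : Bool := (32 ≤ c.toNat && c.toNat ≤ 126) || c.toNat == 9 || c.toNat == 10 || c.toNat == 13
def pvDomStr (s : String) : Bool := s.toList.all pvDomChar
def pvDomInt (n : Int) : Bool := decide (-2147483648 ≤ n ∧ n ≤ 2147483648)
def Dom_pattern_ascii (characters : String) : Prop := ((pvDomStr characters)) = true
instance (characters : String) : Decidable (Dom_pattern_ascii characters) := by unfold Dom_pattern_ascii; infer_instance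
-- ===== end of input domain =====

-- B replaces A's bin()/zfill string formatting with arithmetic bit extraction: it walks the
-- string backwards, emits each character's 8 bits least-significant-first via divmod, and
-- reverses once at the end (identical to A on the ASCII domain claimed).


-- ===== PORT A =====
-- res = []; for c in characters: binary = bin(ord(c))[2:].zfill(8); for b in binary: append "i"/"o"; "".join(res)
def pattern_ascii (characters : String) : String :=
  let res : List String :=
    characters.toList.foldl (fun res c =>
      let binary := PySem.Int.pyBin (c.toNat : Int)
      let binary := PySem.Str.zfill (PySem.Str.slice binary (some 2) none) 8
      binary.toList.foldl (fun res b => res ++ [if b == '1' then "i" else "o"]) res) []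
  PySem.Str.join "" res

-- ===== PORT B =====
-- bits = []; for c in reversed(characters): n = ord(c); 8 × (n, r = divmod(n, 2); bits.append('i' if r else 'o'));
-- ''.join(reversed(bits)) — bits holds single characters, so the join is ported exactly as
-- String.ofList of the reversed character list.
def pattern_ascii_alt (characters : String) : String :=
  let bits : List Char :=
    characters.toList.reverse.foldl (fun bits c =>
      let st := (List.range 8).foldl (fun (st : List Char × Nat) _ =>
        let n := st.2 / 2
        let r := st.2 % 2
        (st.1 ++ [if r = 1 then 'i' else 'o'], n)) (bits, c.toNat)
      st.1) []
  String.ofList bits.reverse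

-- ===== PRECONDITION & SPEC =====
def Spec_pattern_ascii (characters : String) (out : String) : Prop := out = pattern_ascii_alt characters
instance (characters : String) (out : String) : Decidable (Spec_pattern_ascii characters out) := by unfold Spec_pattern_ascii; infer_instance

-- ===== CLAIM (what is proved, stated in full; the proofs are below) =====
def Claim_equal_pattern_ascii : Prop := ∀ (characters : String), Dom_pattern_ascii characters → Spec_pattern_ascii characters (pattern_ascii characters)

-- ===== LEMMAS AND PROOFS =====

-- A's per-character bit string, as the port computes it
def pvBitsA (c : Char) : String :=
  PySem.Str.zfill (PySem.Str.slice (PySem.Int.pyBin (c.toNat : Int)) (some 2) none) 8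

-- B's inner step and its per-character LSB-first bit list
def pvStep (st : List Char × Nat) : List Char × Nat :=
  (st.1 ++ [if st.2 % 2 = 1 then 'i' else 'o'], st.2 / 2)

def pvLsb (n : Nat) : List Char :=
  ((List.range 8).foldl (fun st _ => pvStep st) ([], n)).1

-- the inner per-bit loop of A is a map
theorem pvFoldlPush {α β : Type} (f : α → β) (l : List α) (acc : List β) :
    l.foldl (fun r b => r ++ [f b]) acc = acc ++ l.map f := by
  induction l generalizing acc with
  | nil => simp
  | cons x xs ih => simp [ih]

-- A's outer loop accumulates a flatMap of per-character blocks
theorem pvFoldA (l : List Char) (acc : List String) :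
    l.foldl (fun res c =>
      (PySem.Str.zfill (PySem.Str.slice (PySem.Int.pyBin (c.toNat : Int)) (some 2) none) 8).toList.foldl
        (fun res b => res ++ [if b == '1' then "i" else "o"]) res) acc
    = acc ++ l.flatMap (fun c => (pvBitsA c).toList.map (fun b => if b == '1' then "i" else "o")) := by
  induction l generalizing acc with
  | nil => simp
  | cons x xs ih =>
    simp only [List.foldl_cons]
    rw [pvFoldlPush, ih]
    simp [pvBitsA]

-- B's inner loop only ever appends: the accumulator factors out
theorem pvInnerAcc (l : List Nat) (bits : List Char) (n : Nat) :
    l.foldl (fun st _ => pvStep st) (bits, n)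
      = (bits ++ (l.foldl (fun st _ => pvStep st) (([] : List Char), n)).1,
         (l.foldl (fun st _ => pvStep st) (([] : List Char), n)).2) := by
  induction l generalizing bits n with
  | nil => simp
  | cons x xs ih =>
    simp only [List.foldl_cons]
    show List.foldl (fun st _ => pvStep st) ((pvStep (bits, n)).1, (pvStep (bits, n)).2) xs = _
    rw [ih (pvStep (bits, n)).1 (pvStep (bits, n)).2]
    conv_rhs =>
      rw [show List.foldl (fun st _ => pvStep st) (pvStep (([] : List Char), n)) xs
            = List.foldl (fun st _ => pvStep st) ((pvStep (([] : List Char), n)).1,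
                (pvStep (([] : List Char), n)).2) xs from rfl,
          ih (pvStep (([] : List Char), n)).1 (pvStep (([] : List Char), n)).2]
    simp [pvStep]

-- B's outer loop is a flatMap of LSB-first blocks
theorem pvFoldB (l : List Char) (acc : List Char) :
    l.foldl (fun bits c =>
      ((List.range 8).foldl (fun (st : List Char × Nat) _ =>
        (st.1 ++ [if st.2 % 2 = 1 then 'i' else 'o'], st.2 / 2)) (bits, c.toNat)).1) acc
    = acc ++ l.flatMap (fun c => pvLsb c.toNat) := by
  induction l generalizing acc with
  | nil => simp
  | cons x xs ih =>
    simp only [List.foldl_cons]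
    have : ∀ (bits : List Char) (n : Nat),
        ((List.range 8).foldl (fun (st : List Char × Nat) _ =>
          (st.1 ++ [if st.2 % 2 = 1 then 'i' else 'o'], st.2 / 2)) (bits, n)).1
        = bits ++ pvLsb n := by
      intro bits n
      have h := pvInnerAcc (List.range 8) bits n
      simp only [pvStep] at h
      rw [h]; rfl
    rw [this, ih]
    simp

-- per-character agreement: A's MSB-first "i"/"o" block is the reverse of B's LSB-first block
set_option maxRecDepth 4000 in
theorem pvPerCharFin : ∀ (n : Fin 128),
    ((PySem.Str.zfill (PySem.Str.slice (PySem.Int.pyBin (n : Int)) (some 2) none) 8).toList.map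
        (fun b => if b == '1' then 'i' else 'o'))
      = (pvLsb n).reverse := by decide

theorem pvPerChar (c : Char) (h : pvDomChar c = true) :
    ((pvBitsA c).toList.map (fun b => if b == '1' then 'i' else 'o'))
      = (pvLsb c.toNat).reverse := by
  have hlt : c.toNat < 128 := by
    simp [pvDomChar] at h
    omega
  exact pvPerCharFin ⟨c.toNat, hlt⟩

-- "".join at the character level is concatenation
theorem pvJoinNil (parts : List (List Char)) : PySem.Chars.join [] parts = parts.flatten := by
  induction parts with
  | nil => simp [PySem.Chars.join_nil]
  | cons a rest ih =>
    cases rest with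
    | nil => simp [PySem.Chars.join_singleton]
    | cons b r => simp [PySem.Chars.join_cons_cons, ih]

theorem pvSingle (b : Char) :
    (if b == '1' then "i" else "o").toList = [if b == '1' then 'i' else 'o'] := by
  by_cases h : b == '1' <;> simp [h]

theorem pvFlatSingle (m : List Char) :
    (m.map (fun b => (if b == '1' then "i" else "o").toList)).flatten
      = m.map (fun b => if b == '1' then 'i' else 'o') := by
  induction m with
  | nil => simp
  | cons x xs ih =>
    rw [List.map_cons, List.flatten_cons, pvSingle, ih]
    rfl

-- A's flattened character stream equals the reverse of B's reverse-order LSB stream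
theorem pvMain (l : List Char) (h : ∀ c ∈ l, pvDomChar c = true) :
    (l.flatMap (fun a => (pvBitsA a).toList.map
        (String.toList ∘ fun b => if b == '1' then "i" else "o"))).flatten
      = (l.reverse.flatMap (fun c => pvLsb c.toNat)).reverse := by
  induction l with
  | nil => simp
  | cons x xs ih =>
    have hx := pvPerChar x (h x (List.mem_cons_self))
    have hxs := ih (fun c hc => h c (List.mem_cons_of_mem _ hc))
    simp only [List.flatMap_cons, List.reverse_cons, List.flatMap_append, List.reverse_append,
      List.flatMap_nil, List.append_nil, List.flatten_append]
    have hsingle : ((pvBitsA x).toList.map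
        (String.toList ∘ fun b => if b == '1' then "i" else "o")).flatten
        = (pvBitsA x).toList.map (fun b => if b == '1' then 'i' else 'o') := by
      have := pvFlatSingle (pvBitsA x).toList
      rw [← this]
      rfl
    rw [hsingle, hx, hxs]

-- ===== VERDICT (by name: the statement is the Claim_ definition above) =====
theorem pattern_ascii_spec : Claim_equal_pattern_ascii := by
  intro characters hdom
  unfold Spec_pattern_ascii pattern_ascii pattern_ascii_alt
  apply String.toList_inj.mp
  rw [pvFoldA, pvFoldB]
  have hmem : ∀ c ∈ characters.toList, pvDomChar c = true := by
    have := hdom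
    unfold Dom_pattern_ascii pvDomStr at this
    simpa [List.all_eq_true] using this
  simp only [List.nil_append, PySem.Str.toList_join, String.toList_ofList]
  have he : ("" : String).toList = [] := by decide
  simp only [he, pvJoinNil]
  have := pvMain characters.toList hmem
  simpa [Function.comp_def, List.flatMap_def] using this
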